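-- pv_equiv track=rewrite | github.com/Mmaymer/algoStageJuin23 | CourbesValidation.py | supprZerosDbl
-- ===== SOURCE A (Python) =====
-- def supprZerosDbl(resultsCC1,resultsCC2,resultsPB,resultsM,resultsLab):
--     notZerosIndex = [[-1]*len(resultsLab[0])]*len(resultsLab)
--     Lab = [resultsLab[0]] + [[-1]*len(resultsLab[0])]*(len(resultsLab)-1)
--     CC1 = [resultsCC1[0]] + [[-1]*len(resultsLab[0])]*(len(resultsLab)-1)
--     CC2 = [resultsCC2[0]] + [[-1]*len(resultsLab[0])]*(len(resultsLab)-1)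
--     PB = [resultsPB[0]] + [[-1]*len(resultsLab[0])]*(len(resultsLab)-1)
--     M = [resultsM[0]] + [[-1]*len(resultsLab[0])]*(len(resultsLab)-1)
--
--     for i in range(1,len(resultsLab)):
--
--         notZerosIndex[i] = [j for j in range(len(resultsLab[i])) if resultsLab[i][j] != 0]
--
--         Lab[i] = [resultsLab[i][j] for j in notZerosIndex[i] if j != -1]
--         CC1[i] = [resultsCC1[i][j] for j in notZerosIndex[i] if j != -1]
--         CC2[i] = [resultsCC2[i][j] for j in notZerosIndex[i] if j != -1]
--         PB[i] = [resultsPB[i][j] for j in notZerosIndex[i] if j != -1]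
--         M[i] = [resultsM[i][j] for j in notZerosIndex[i] if j != -1]
--
--     return CC1, CC2, PB, M, Lab
-- ===== SOURCE B (Python) =====
-- def supprZerosDbl(resultsCC1, resultsCC2, resultsPB, resultsM, resultsLab):
--     CC1 = [resultsCC1[0]]
--     CC2 = [resultsCC2[0]]
--     PB = [resultsPB[0]]
--     M = [resultsM[0]]
--     Lab = [resultsLab[0]]
--     for i in range(1, len(resultsLab)):
--         lab = resultsLab[i]
--         c1 = []
--         c2 = []
--         pb = []
--         m = []
--         lb = []
--         for j in range(len(lab)):
--             if lab[j] != 0: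
--                 lb.append(lab[j])
--                 c1.append(resultsCC1[i][j])
--                 c2.append(resultsCC2[i][j])
--                 pb.append(resultsPB[i][j])
--                 m.append(resultsM[i][j])
--         CC1.append(c1)
--         CC2.append(c2)
--         PB.append(pb)
--         M.append(m)
--         Lab.append(lb)
--     return CC1, CC2, PB, M, Lab
-- ===== Notes on version B (the rewrite author's own statement) =====
-- stated objective: simpler
-- what changed: Removed the preallocated -1 placeholder tables and the precomputed notZerosIndex index list with its five per-row comprehension passes; B builds the five outputs by appending, with one combined pass per row over j that appends the kept entries of all five parallel arrays at once.
import Mathlib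
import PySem

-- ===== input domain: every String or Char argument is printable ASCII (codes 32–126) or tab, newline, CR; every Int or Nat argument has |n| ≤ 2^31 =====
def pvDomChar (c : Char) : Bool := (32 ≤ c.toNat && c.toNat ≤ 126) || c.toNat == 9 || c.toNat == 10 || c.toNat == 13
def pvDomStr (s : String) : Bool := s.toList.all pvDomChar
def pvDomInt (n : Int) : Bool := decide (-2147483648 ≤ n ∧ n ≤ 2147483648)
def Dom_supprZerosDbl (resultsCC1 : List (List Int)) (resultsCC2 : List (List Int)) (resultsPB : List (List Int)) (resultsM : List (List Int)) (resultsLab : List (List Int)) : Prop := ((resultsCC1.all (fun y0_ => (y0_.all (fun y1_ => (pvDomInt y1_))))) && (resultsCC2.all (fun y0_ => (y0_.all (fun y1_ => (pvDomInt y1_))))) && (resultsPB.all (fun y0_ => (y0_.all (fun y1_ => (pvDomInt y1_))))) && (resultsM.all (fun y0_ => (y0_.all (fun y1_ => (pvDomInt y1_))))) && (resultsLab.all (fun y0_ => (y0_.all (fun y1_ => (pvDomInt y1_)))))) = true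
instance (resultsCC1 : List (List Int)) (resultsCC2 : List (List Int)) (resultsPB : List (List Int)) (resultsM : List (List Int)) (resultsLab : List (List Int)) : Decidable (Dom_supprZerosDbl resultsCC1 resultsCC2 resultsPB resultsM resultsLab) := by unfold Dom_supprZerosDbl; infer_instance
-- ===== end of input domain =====

-- B removes A's precomputed notZerosIndex table and the five comprehensions per row: one combined per-row pass
-- appends the kept entries of all five parallel arrays at once (objective: simpler; return value only, no mutation).

-- ===== PORT A =====
def supprZerosDbl (resultsCC1 : List (List Int)) (resultsCC2 : List (List Int)) (resultsPB : List (List Int)) (resultsM : List (List Int)) (resultsLab : List (List Int)) : List (List Int) × List (List Int) × List (List Int) × List (List Int) × List (List Int) :=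
  let n0 := (PySem.List.pyGetD resultsLab 0 []).length
  let pad := List.replicate (resultsLab.length - 1) (List.replicate n0 (-1 : Int))
  let CC1 := [PySem.List.pyGetD resultsCC1 0 []] ++ pad
  let CC2 := [PySem.List.pyGetD resultsCC2 0 []] ++ pad
  let PB := [PySem.List.pyGetD resultsPB 0 []] ++ pad
  let M := [PySem.List.pyGetD resultsM 0 []] ++ pad
  let Lab := [PySem.List.pyGetD resultsLab 0 []] ++ pad
  (PySem.List.pyRange 1 (resultsLab.length : Int) 1).foldl
    (fun st i =>
      -- notZerosIndex[i] = [j for j in range(len(resultsLab[i])) if resultsLab[i][j] != 0]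
      let nz := (PySem.List.pyRange 0 ((PySem.List.pyGetD resultsLab i []).length : Int) 1).filter
        (fun j => PySem.List.pyGetD (PySem.List.pyGetD resultsLab i []) j 0 != 0)
      (st.1.set i.toNat ((nz.filter (fun j => j != -1)).map (fun j => PySem.List.pyGetD (PySem.List.pyGetD resultsCC1 i []) j 0)),
       st.2.1.set i.toNat ((nz.filter (fun j => j != -1)).map (fun j => PySem.List.pyGetD (PySem.List.pyGetD resultsCC2 i []) j 0)),
       st.2.2.1.set i.toNat ((nz.filter (fun j => j != -1)).map (fun j => PySem.List.pyGetD (PySem.List.pyGetD resultsPB i []) j 0)),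
       st.2.2.2.1.set i.toNat ((nz.filter (fun j => j != -1)).map (fun j => PySem.List.pyGetD (PySem.List.pyGetD resultsM i []) j 0)),
       st.2.2.2.2.set i.toNat ((nz.filter (fun j => j != -1)).map (fun j => PySem.List.pyGetD (PySem.List.pyGetD resultsLab i []) j 0))))
    (CC1, CC2, PB, M, Lab)

-- ===== PORT B =====
def supprZerosDbl_alt (resultsCC1 : List (List Int)) (resultsCC2 : List (List Int)) (resultsPB : List (List Int)) (resultsM : List (List Int)) (resultsLab : List (List Int)) : List (List Int) × List (List Int) × List (List Int) × List (List Int) × List (List Int) :=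
  (PySem.List.pyRange 1 (resultsLab.length : Int) 1).foldl
    (fun st i =>
      let lab := PySem.List.pyGetD resultsLab i []
      -- one combined pass over j: append to the five row accumulators when lab[j] != 0
      let row := (PySem.List.pyRange 0 (lab.length : Int) 1).foldl
        (fun acc j =>
          if PySem.List.pyGetD lab j 0 != 0 then
            (acc.1 ++ [PySem.List.pyGetD (PySem.List.pyGetD resultsCC1 i []) j 0],
             acc.2.1 ++ [PySem.List.pyGetD (PySem.List.pyGetD resultsCC2 i []) j 0],
             acc.2.2.1 ++ [PySem.List.pyGetD (PySem.List.pyGetD resultsPB i []) j 0],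
             acc.2.2.2.1 ++ [PySem.List.pyGetD (PySem.List.pyGetD resultsM i []) j 0],
             acc.2.2.2.2 ++ [PySem.List.pyGetD lab j 0])
          else acc)
        (([] : List Int), ([] : List Int), ([] : List Int), ([] : List Int), ([] : List Int))
      (st.1 ++ [row.1], st.2.1 ++ [row.2.1], st.2.2.1 ++ [row.2.2.1], st.2.2.2.1 ++ [row.2.2.2.1], st.2.2.2.2 ++ [row.2.2.2.2]))
    ([PySem.List.pyGetD resultsCC1 0 []], [PySem.List.pyGetD resultsCC2 0 []],
     [PySem.List.pyGetD resultsPB 0 []], [PySem.List.pyGetD resultsM 0 []],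
     [PySem.List.pyGetD resultsLab 0 []])

-- ===== PRECONDITION & SPEC =====
-- Pre_ excludes exactly the inputs where the Python raises IndexError: an empty argument list
-- (row 0 of each of the five is read unconditionally), or, for a row i ≥ 1 with a surviving
-- column j (resultsLab[i][j] != 0), a parallel array missing row i or entry j.
def Pre_supprZerosDbl (resultsCC1 : List (List Int)) (resultsCC2 : List (List Int)) (resultsPB : List (List Int)) (resultsM : List (List Int)) (resultsLab : List (List Int)) : Prop :=
  resultsLab ≠ [] ∧ resultsCC1 ≠ [] ∧ resultsCC2 ≠ [] ∧ resultsPB ≠ [] ∧ resultsM ≠ [] ∧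
  ∀ i ∈ List.range resultsLab.length, 1 ≤ i →
    ∀ j ∈ List.range (resultsLab.getD i []).length, (resultsLab.getD i []).getD j 0 ≠ 0 →
      i < resultsCC1.length ∧ j < (resultsCC1.getD i []).length ∧
      i < resultsCC2.length ∧ j < (resultsCC2.getD i []).length ∧
      i < resultsPB.length ∧ j < (resultsPB.getD i []).length ∧
      i < resultsM.length ∧ j < (resultsM.getD i []).length
instance (resultsCC1 : List (List Int)) (resultsCC2 : List (List Int)) (resultsPB : List (List Int)) (resultsM : List (List Int)) (resultsLab : List (List Int)) : Decidable (Pre_supprZerosDbl resultsCC1 resultsCC2 resultsPB resultsM resultsLab) := by unfold Pre_supprZerosDbl; infer_instance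

def pvWitness_supprZerosDbl : List (List Int) × List (List Int) × List (List Int) × List (List Int) × List (List Int) :=
  ([[10, 11], [20, 21]], [[12, 13], [22, 23]], [[14, 15], [24, 25]], [[16, 17], [26, 27]], [[1, 0], [0, 3]])

def Spec_supprZerosDbl (resultsCC1 : List (List Int)) (resultsCC2 : List (List Int)) (resultsPB : List (List Int)) (resultsM : List (List Int)) (resultsLab : List (List Int)) (out : List (List Int) × List (List Int) × List (List Int) × List (List Int) × List (List Int)) : Prop := out = supprZerosDbl_alt resultsCC1 resultsCC2 resultsPB resultsM resultsLab
instance (resultsCC1 : List (List Int)) (resultsCC2 : List (List Int)) (resultsPB : List (List Int)) (resultsM : List (List Int)) (resultsLab : List (List Int)) (out : List (List Int) × List (List Int) × List (List Int) × List (List Int) × List (List Int)) : Decidable (Spec_supprZerosDbl resultsCC1 resultsCC2 resultsPB resultsM resultsLab out) := by unfold Spec_supprZerosDbl; infer_instance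

-- ===== CLAIM (what is proved, stated in full; the proofs are below) =====
def Claim_equal_supprZerosDbl : Prop := ∀ (resultsCC1 : List (List Int)) (resultsCC2 : List (List Int)) (resultsPB : List (List Int)) (resultsM : List (List Int)) (resultsLab : List (List Int)), Dom_supprZerosDbl resultsCC1 resultsCC2 resultsPB resultsM resultsLab → Pre_supprZerosDbl resultsCC1 resultsCC2 resultsPB resultsM resultsLab → Spec_supprZerosDbl resultsCC1 resultsCC2 resultsPB resultsM resultsLab (supprZerosDbl resultsCC1 resultsCC2 resultsPB resultsM resultsLab)

-- ===== LEMMAS AND PROOFS =====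

-- B's combined inner pass, split into the five independent filtered maps it accumulates
theorem pv_inner_split (resultsCC1 resultsCC2 resultsPB resultsM : List (List Int)) (labR : List Int) (i : Int)
    (js : List Int) (a b c d e : List Int) :
    js.foldl
      (fun acc j =>
        if PySem.List.pyGetD labR j 0 != 0 then
          (acc.1 ++ [PySem.List.pyGetD (PySem.List.pyGetD resultsCC1 i []) j 0],
           acc.2.1 ++ [PySem.List.pyGetD (PySem.List.pyGetD resultsCC2 i []) j 0],
           acc.2.2.1 ++ [PySem.List.pyGetD (PySem.List.pyGetD resultsPB i []) j 0],
           acc.2.2.2.1 ++ [PySem.List.pyGetD (PySem.List.pyGetD resultsM i []) j 0],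
           acc.2.2.2.2 ++ [PySem.List.pyGetD labR j 0])
        else acc) (a, b, c, d, e)
    = (a ++ ((js.filter (fun j => PySem.List.pyGetD labR j 0 != 0)).map (fun j => PySem.List.pyGetD (PySem.List.pyGetD resultsCC1 i []) j 0)),
       b ++ ((js.filter (fun j => PySem.List.pyGetD labR j 0 != 0)).map (fun j => PySem.List.pyGetD (PySem.List.pyGetD resultsCC2 i []) j 0)),
       c ++ ((js.filter (fun j => PySem.List.pyGetD labR j 0 != 0)).map (fun j => PySem.List.pyGetD (PySem.List.pyGetD resultsPB i []) j 0)),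
       d ++ ((js.filter (fun j => PySem.List.pyGetD labR j 0 != 0)).map (fun j => PySem.List.pyGetD (PySem.List.pyGetD resultsM i []) j 0)),
       e ++ ((js.filter (fun j => PySem.List.pyGetD labR j 0 != 0)).map (fun j => PySem.List.pyGetD labR j 0))) := by
  induction js generalizing a b c d e with
  | nil => simp
  | cons x xs ih =>
    simp only [List.foldl_cons]
    by_cases h : (PySem.List.pyGetD labR x 0 != 0) = true
    · rw [if_pos h, ih]
      simp [h]
    · rw [if_neg h, ih]
      simp [h]

-- an append-only 5-tuple fold is five independent appends
theorem pv_outer_split_B (f1 f2 f3 f4 f5 : Int → List Int) (js : List Int) (a b c d e : List (List Int)) :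
    js.foldl (fun st i => (st.1 ++ [f1 i], st.2.1 ++ [f2 i], st.2.2.1 ++ [f3 i], st.2.2.2.1 ++ [f4 i], st.2.2.2.2 ++ [f5 i])) (a, b, c, d, e)
    = (a ++ js.map f1, b ++ js.map f2, c ++ js.map f3, d ++ js.map f4, e ++ js.map f5) := by
  induction js generalizing a b c d e with
  | nil => simp
  | cons x xs ih => simp [List.foldl_cons, ih]

-- a set-only 5-tuple fold is five independent set-folds
theorem pv_outer_split_A (g1 g2 g3 g4 g5 : Int → List Int) (js : List Int) (a b c d e : List (List Int)) :
    js.foldl (fun st i => (st.1.set i.toNat (g1 i), st.2.1.set i.toNat (g2 i), st.2.2.1.set i.toNat (g3 i), st.2.2.2.1.set i.toNat (g4 i), st.2.2.2.2.set i.toNat (g5 i))) (a, b, c, d, e)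
    = (js.foldl (fun L i => L.set i.toNat (g1 i)) a, js.foldl (fun L i => L.set i.toNat (g2 i)) b,
       js.foldl (fun L i => L.set i.toNat (g3 i)) c, js.foldl (fun L i => L.set i.toNat (g4 i)) d,
       js.foldl (fun L i => L.set i.toNat (g5 i)) e) := by
  induction js generalizing a b c d e with
  | nil => rfl
  | cons x xs ih => simp only [List.foldl_cons]; exact ih _ _ _ _ _

-- setting only indices inside X leaves an appended tail untouched
theorem pv_setfold_append (f : Int → List Int) (js : List Int) (X : List (List Int)) (y : List Int)
    (h : ∀ i ∈ js, i.toNat < X.length) :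
    js.foldl (fun L i => L.set i.toNat (f i)) (X ++ [y])
    = (js.foldl (fun L i => L.set i.toNat (f i)) X) ++ [y] := by
  induction js generalizing X with
  | nil => rfl
  | cons x xs ih =>
    simp only [List.foldl_cons]
    rw [List.set_append_left _ _ (h x (List.mem_cons_self))]
    exact ih _ (fun i hi => by simpa using h i (List.mem_cons_of_mem _ hi))

-- closed form of A's "allocate then set row i" pattern
theorem pv_setfold_closed (f : Int → List Int) (h d : List Int) (N : Nat) :
    (PySem.List.pyRange 1 (N : Int) 1).foldl (fun L i => L.set i.toNat (f i)) ([h] ++ List.replicate (N - 1) d)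
    = [h] ++ (PySem.List.pyRange 1 (N : Int) 1).map f := by
  induction N with
  | zero => simp [PySem.List.pyRange_one_eq_nil]
  | succ n ih =>
    cases n with
    | zero => simp [PySem.List.pyRange_one_eq_nil]
    | succ k =>
      have hsplit : ((k + 1 + 1 : Nat) : Int) = ((k + 1 : Nat) : Int) + 1 := by push_cast; ring
      rw [hsplit, PySem.List.pyRange_one_succ_right (by push_cast; omega)]
      have hrep : List.replicate (k + 1 + 1 - 1) d = List.replicate (k + 1 - 1) d ++ [d] := by
        simp [List.replicate_succ']
      rw [hrep, ← List.append_assoc, List.foldl_append,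
        pv_setfold_append f _ _ _ (by
          intro i hi
          have hmem := (PySem.List.mem_pyRange_one).1 hi
          simp only [List.length_append, List.length_replicate, List.length_cons,
            List.length_nil]; omega),
        ih]
      have htn : ((k + 1 : Nat) : Int).toNat = k + 1 := by omega
      have hlen : ([h] ++ (PySem.List.pyRange 1 ((k + 1 : Nat) : Int) 1).map f).length = k + 1 := by
        simp only [List.length_append, List.length_map, PySem.List.length_pyRange_one,
          List.length_cons, List.length_nil]; omega
      simp only [List.foldl_cons, List.foldl_nil, List.map_append, List.map_cons, List.map_nil]
      rw [htn, List.set_append_right _ _ (le_of_eq hlen), hlen]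
      simp

-- every candidate column index is nonnegative, so A's "if j != -1" guard never drops anything
theorem pv_filter_ne_neg1 (L : Int) (p : Int → Bool) :
    ((PySem.List.pyRange 0 L 1).filter p).filter (fun j => j != -1)
    = (PySem.List.pyRange 0 L 1).filter p := by
  apply List.filter_eq_self.mpr
  intro x hx
  have hx' := (PySem.List.mem_pyRange_one).1 (List.mem_of_mem_filter hx)
  simp only [bne_iff_ne, ne_eq]
  omega

theorem pv_main (resultsCC1 resultsCC2 resultsPB resultsM resultsLab : List (List Int)) :
    supprZerosDbl resultsCC1 resultsCC2 resultsPB resultsM resultsLab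
    = supprZerosDbl_alt resultsCC1 resultsCC2 resultsPB resultsM resultsLab := by
  simp only [supprZerosDbl, supprZerosDbl_alt]
  simp only [pv_inner_split, pv_filter_ne_neg1, pv_outer_split_B, pv_outer_split_A, List.nil_append]
  rw [pv_setfold_closed, pv_setfold_closed, pv_setfold_closed, pv_setfold_closed, pv_setfold_closed]

-- ===== VERDICT (by name: the statement is the Claim_ definition above) =====
theorem supprZerosDbl_spec : Claim_equal_supprZerosDbl := by
  intro c1 c2 pb m lab _ _
  exact pv_main c1 c2 pb m lab
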